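-- pv_equiv track=rewrite | github.com/aalolexx/handover-toy-case-dataset-generator | grid_manager.py | _is_adjacent_to_cells
-- ===== SOURCE A (Python) =====
-- from typing import Tuple, Optional, List, Set, TYPE_CHECKING
--
-- def _is_adjacent_to_cells(pos: Tuple[int, int], cells: Set[Tuple[int, int]]) -> bool:
--     """Check if position is adjacent to any cell in the set."""
--     row, col = pos
--     for dr in [-1, 0, 1]:
--         for dc in [-1, 0, 1]:
--             if dr == 0 and dc == 0:
--                 continue
--             if (row + dr, col + dc) in cells:
--                 return True
--     return False
-- ===== SOURCE B (Python) =====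
-- def _is_adjacent_to_cells(pos, cells):
--     """Check if position is adjacent to any cell in the set."""
--     row, col = pos
--     return any(c != pos and abs(c[0] - row) <= 1 and abs(c[1] - col) <= 1
--                for c in cells)
-- ===== Notes on version B (the rewrite author's own statement) =====
-- stated objective: simpler
-- what changed: Instead of probing the set with each of the 8 neighbor offsets, B makes one any() pass over the cells testing Chebyshev distance <= 1 and cell != pos.
import Mathlib
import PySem

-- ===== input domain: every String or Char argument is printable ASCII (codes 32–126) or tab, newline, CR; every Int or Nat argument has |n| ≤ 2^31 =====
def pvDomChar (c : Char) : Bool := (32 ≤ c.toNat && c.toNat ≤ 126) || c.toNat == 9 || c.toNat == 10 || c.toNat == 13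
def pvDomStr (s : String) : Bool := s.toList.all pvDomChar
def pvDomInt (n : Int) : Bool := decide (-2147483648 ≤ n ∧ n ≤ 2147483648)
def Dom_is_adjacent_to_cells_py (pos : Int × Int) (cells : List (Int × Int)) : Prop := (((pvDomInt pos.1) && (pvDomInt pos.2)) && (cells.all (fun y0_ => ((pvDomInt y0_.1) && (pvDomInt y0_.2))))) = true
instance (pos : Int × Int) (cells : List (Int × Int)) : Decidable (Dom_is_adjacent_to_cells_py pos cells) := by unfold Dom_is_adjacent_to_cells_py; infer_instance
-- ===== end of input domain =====

-- B replaces the 8-neighbor-offset probe loop by a single any() pass over the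
-- cells testing Chebyshev distance ≤ 1 and cell ≠ pos (objective: simpler).

-- ===== PORT A =====
-- nested 'for dr in [-1,0,1]: for dc in [-1,0,1]' with early return becomes nested List.any
def is_adjacent_to_cells_py (pos : Int × Int) (cells : List (Int × Int)) : Bool :=
  let row := pos.1
  let col := pos.2
  ([(-1 : Int), 0, 1]).any (fun dr =>
    ([(-1 : Int), 0, 1]).any (fun dc =>
      if dr = 0 ∧ dc = 0 then false
      else cells.contains (row + dr, col + dc)))

-- ===== PORT B =====
def is_adjacent_to_cells_py_alt (pos : Int × Int) (cells : List (Int × Int)) : Bool :=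
  let row := pos.1
  let col := pos.2
  cells.any (fun c => c ≠ pos && (c.1 - row).natAbs ≤ 1 && (c.2 - col).natAbs ≤ 1)

-- ===== PRECONDITION & SPEC =====
def Spec_is_adjacent_to_cells_py (pos : Int × Int) (cells : List (Int × Int)) (out : Bool) : Prop := out = is_adjacent_to_cells_py_alt pos cells
instance (pos : Int × Int) (cells : List (Int × Int)) (out : Bool) : Decidable (Spec_is_adjacent_to_cells_py pos cells out) := by unfold Spec_is_adjacent_to_cells_py; infer_instance

-- ===== CLAIM (what is proved, stated in full; the proofs are below) =====
def Claim_equal_is_adjacent_to_cells_py : Prop := ∀ (pos : Int × Int) (cells : List (Int × Int)), Dom_is_adjacent_to_cells_py pos cells → Spec_is_adjacent_to_cells_py pos cells (is_adjacent_to_cells_py pos cells)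

-- ===== LEMMAS AND PROOFS =====

-- ===== VERDICT (by name: the statement is the Claim_ definition above) =====
theorem is_adjacent_to_cells_py_spec : Claim_equal_is_adjacent_to_cells_py := by
  intro ⟨row, col⟩ cells _
  unfold Spec_is_adjacent_to_cells_py is_adjacent_to_cells_py is_adjacent_to_cells_py_alt
  rw [Bool.eq_iff_iff]
  simp only [List.any_eq_true, List.mem_cons, decide_eq_true_eq, Bool.and_eq_true,
    ne_eq, List.contains_iff_mem, Bool.if_false_left, Bool.not_eq_true',
    decide_eq_false_iff_not, List.not_mem_nil, or_false, and_assoc]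
  constructor
  · rintro ⟨dr, hdr, dc, hdc, hnz, hmem⟩
    have hdr' : -1 ≤ dr ∧ dr ≤ 1 := by rcases hdr with h | h | h <;> omega
    have hdc' : -1 ≤ dc ∧ dc ≤ 1 := by rcases hdc with h | h | h <;> omega
    refine ⟨(row + dr, col + dc), hmem, ?_, ?_, ?_⟩
    · intro h
      injection h with e1 e2
      exact hnz ⟨by omega, by omega⟩
    · omega
    · omega
  · rintro ⟨c, hc, hne, h1, h2⟩
    obtain ⟨c1, c2⟩ := c
    simp only at h1 h2
    refine ⟨c1 - row, by omega, c2 - col, by omega, ?_, ?_⟩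
    · rintro ⟨e1, e2⟩
      exact hne (by rw [show c1 = row by omega, show c2 = col by omega])
    · have e1 : row + (c1 - row) = c1 := by omega
      have e2 : col + (c2 - col) = c2 := by omega
      rw [e1, e2]
      exact hc
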